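-- pv_equiv track=rewrite | github.com/ttzytt/PyAutoGrade | tests/obfuscated_tested_codes [copied at 2024-01-31 10#28#19.243191]/tested_code/14/Unit 1/Cards/card_functions_reviewed.py | uno_who_played_what_B5
-- ===== SOURCE A (Python) =====
-- def uno_who_played_what_B5(cards_played, num_players, starting_player):
--
--
--
--
--     hands = []
--
--
--     for i in range(num_players):
--         hands.append([])
--
--
--
--
--     list_index_revision = 1 - starting_player
--
--     number_reverse = 0
--
--     for i in range(len(cards_played)):
--
--         if cards_played[i] == 'reverse':
--             number_reverse += 1
--
--             hands[(i - list_index_revision) % num_players].append(cards_played[i])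
--
--
--         elif cards_played[i] == 'skip':
--
--             hands[(i - list_index_revision) % num_players].append(cards_played[i])
--
--
--             if number_reverse % 2 == 1:
--                 list_index_revision += 1
--             else:
--                 list_index_revision -= 1
--
--
--         else:
--             hands[(i - list_index_revision) % num_players].append(cards_played[i])
--
--         if number_reverse % 2 == 1:
--
--
--             list_index_revision += 2
--
--     return hands
-- ===== SOURCE B (Python) =====
-- def uno_who_played_what_B5(cards_played, num_players, starting_player):
--     # Stage 1: parity of 'reverse' cards among cards_played[:i+1], per card.
--     parities = []
--     p = 0
--     for c in cards_played:
--         p ^= (c == 'reverse')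
--         parities.append(p)
--     # Stage 2: signed step each card moves the turn pointer by (after its own effect).
--     steps = [(-1 if q else 1) * (2 if c == 'skip' else 1)
--              for c, q in zip(cards_played, parities)]
--     # Stage 3: seat of each card = prefix sum of steps, mod num_players.
--     seats = []
--     total = starting_player - 1
--     for s in steps:
--         seats.append(total % num_players)
--         total += s
--     # Stage 4: bucket the cards by seat.
--     hands = [[] for _ in range(num_players)]
--     for c, k in zip(cards_played, seats):
--         hands[k].append(c)
--     return hands
-- ===== Notes on version B (the rewrite author's own statement) =====
-- stated objective: alternative
-- what changed: Replaces A's stateful single-pass simulation (mutable index-revision offset and reverse counter updated per branch) by four staged passes: compute each card's reverse-prefix parity, derive each card's signed step, take prefix sums mod num_players to get each card's seat, then bucket the cards by seat.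
import Mathlib
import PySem

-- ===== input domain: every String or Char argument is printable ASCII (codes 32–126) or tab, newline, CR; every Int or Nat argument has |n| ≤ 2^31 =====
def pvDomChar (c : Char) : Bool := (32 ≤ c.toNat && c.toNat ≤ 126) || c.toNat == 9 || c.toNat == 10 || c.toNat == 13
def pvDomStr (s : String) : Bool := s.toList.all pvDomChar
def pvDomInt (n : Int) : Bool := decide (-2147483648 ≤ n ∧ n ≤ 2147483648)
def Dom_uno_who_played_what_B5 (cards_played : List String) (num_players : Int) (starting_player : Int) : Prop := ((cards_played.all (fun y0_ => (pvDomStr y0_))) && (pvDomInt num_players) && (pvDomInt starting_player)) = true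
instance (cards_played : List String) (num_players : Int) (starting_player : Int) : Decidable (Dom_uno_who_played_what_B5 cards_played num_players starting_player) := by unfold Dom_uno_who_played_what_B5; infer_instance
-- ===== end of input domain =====

-- B replaces A's stateful single-pass simulation by staged passes: per-card reverse parities,
-- then per-card signed steps, then seats by prefix sums mod num_players, then bucketing;
-- same return value, simpler decomposition, no speed claim.

-- hands[k].append(c): exact for 0 ≤ k < hands.length (guaranteed under Pre_; Python raises otherwise)
def pvAppendAt (hands : List (List String)) (k : Int) (c : String) : List (List String) :=
  hands.modify k.toNat (fun h => h ++ [c])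

-- ===== PORT A =====
-- the for-loop of A over range(len(cards_played)); state: i, list_index_revision, number_reverse, hands
-- ('% 2' on a nonnegative counter is ported as Lean '%', exact since the divisor 2 is positive)
def unoA_loop : List String → Nat → Int → Int → Int → List (List String) → List (List String)
  | [], _, _, _, _, hands => hands
  | c :: rest, i, rev, nr, n, hands =>
    if c == "reverse" then
      let nr' := nr + 1
      let hands' := pvAppendAt hands (PySem.Int.mod ((i : Int) - rev) n) c
      let rev' := if nr' % 2 = 1 then rev + 2 else rev
      unoA_loop rest (i + 1) rev' nr' n hands'
    else if c == "skip" then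
      let hands' := pvAppendAt hands (PySem.Int.mod ((i : Int) - rev) n) c
      let rev1 := if nr % 2 = 1 then rev + 1 else rev - 1
      let rev' := if nr % 2 = 1 then rev1 + 2 else rev1
      unoA_loop rest (i + 1) rev' nr n hands'
    else
      let hands' := pvAppendAt hands (PySem.Int.mod ((i : Int) - rev) n) c
      let rev' := if nr % 2 = 1 then rev + 2 else rev
      unoA_loop rest (i + 1) rev' nr n hands'

def uno_who_played_what_B5 (cards_played : List String) (num_players : Int) (starting_player : Int) : List (List String) :=
  let hands := (PySem.List.pyRange 0 num_players 1).foldl (fun h _ => h ++ [[]]) []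
  unoA_loop cards_played 0 (1 - starting_player) 0 num_players hands

-- ===== PORT B =====
-- Stage 1 of Source B: Python's p holds the int 0/1 and is used only as a truth value; ported as Bool (exact).
def pvParities (cards : List String) : List Bool :=
  (cards.foldl (fun (st : Bool × List Bool) c =>
      let p := Bool.xor st.1 (c == "reverse"); (p, st.2 ++ [p])) (false, [])).2

-- Stage 2: list comprehension over zip(cards, parities)
def pvSteps (cards : List String) : List Int :=
  (cards.zip (pvParities cards)).map
    (fun cq => (if cq.2 then (-1 : Int) else 1) * (if cq.1 == "skip" then 2 else 1))

-- Stage 3: seats by prefix sums; 'total % num_players' via PySem.Int.mod (Python floor mod)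
def pvSeats (steps : List Int) (n total0 : Int) : List Int :=
  (steps.foldl (fun (st : Int × List Int) s => (st.1 + s, st.2 ++ [PySem.Int.mod st.1 n])) (total0, [])).2

def uno_who_played_what_B5_alt (cards_played : List String) (num_players : Int) (starting_player : Int) : List (List String) :=
  let seats := pvSeats (pvSteps cards_played) num_players (starting_player - 1)
  -- Stage 4: hands = [[] for _ in range(num_players)]; bucket cards by seat
  (cards_played.zip seats).foldl (fun hands ck => pvAppendAt hands ck.2 ck.1)
    ((PySem.List.pyRange 0 num_players 1).map (fun _ => []))

-- ===== PRECONDITION & SPEC =====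
-- Pre_ excludes exactly the inputs where A raises (ZeroDivisionError / IndexError):
-- a nonempty card list with num_players ≤ 0; B raises there too.
def Pre_uno_who_played_what_B5 (cards_played : List String) (num_players : Int) (starting_player : Int) : Prop :=
  0 < num_players ∨ cards_played = []
instance (cards_played : List String) (num_players : Int) (starting_player : Int) : Decidable (Pre_uno_who_played_what_B5 cards_played num_players starting_player) := by unfold Pre_uno_who_played_what_B5; infer_instance

def pvWitness_uno_who_played_what_B5 : List String × Int × Int := (["red 3", "skip", "reverse", "blue 7"], 3, 1)

def Spec_uno_who_played_what_B5 (cards_played : List String) (num_players : Int) (starting_player : Int) (out : List (List String)) : Prop := out = uno_who_played_what_B5_alt cards_played num_players starting_player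
instance (cards_played : List String) (num_players : Int) (starting_player : Int) (out : List (List String)) : Decidable (Spec_uno_who_played_what_B5 cards_played num_players starting_player out) := by unfold Spec_uno_who_played_what_B5; infer_instance

-- ===== CLAIM (what is proved, stated in full; the proofs are below) =====
def Claim_equal_uno_who_played_what_B5 : Prop := ∀ (cards_played : List String) (num_players : Int) (starting_player : Int), Dom_uno_who_played_what_B5 cards_played num_players starting_player → Pre_uno_who_played_what_B5 cards_played num_players starting_player → Spec_uno_who_played_what_B5 cards_played num_players starting_player (uno_who_played_what_B5 cards_played num_players starting_player)

-- ===== LEMMAS AND PROOFS =====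

-- recursion-shaped versions of B's four stages, used only in the proofs
def parRec : List String → Bool → List Bool
  | [], _ => []
  | c :: r, p => let p' := Bool.xor p (c == "reverse"); p' :: parRec r p'

def stepsRec : List String → Bool → List Int
  | [], _ => []
  | c :: r, p =>
    let p' := Bool.xor p (c == "reverse")
    ((if p' then (-1 : Int) else 1) * (if c == "skip" then 2 else 1)) :: stepsRec r p'

def seatsRec : List Int → Int → Int → List Int
  | [], _, _ => []
  | s :: r, n, t => PySem.Int.mod t n :: seatsRec r n (t + s)

def distRec : List String → List Int → List (List String) → List (List String)
  | c :: cr, k :: kr, hands => distRec cr kr (pvAppendAt hands k c)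
  | _, _, hands => hands

theorem pv_par_acc (cards : List String) : ∀ (p : Bool) (acc : List Bool),
    (cards.foldl (fun (st : Bool × List Bool) c =>
        let q := Bool.xor st.1 (c == "reverse"); (q, st.2 ++ [q])) (p, acc)).2
      = acc ++ parRec cards p := by
  induction cards with
  | nil => intro p acc; simp [parRec]
  | cons c r ih => intro p acc; simp [List.foldl, parRec, ih]

theorem pv_steps_eq (cards : List String) : ∀ (p : Bool),
    (cards.zip (parRec cards p)).map
      (fun cq => (if cq.2 then (-1 : Int) else 1) * (if cq.1 == "skip" then 2 else 1))
      = stepsRec cards p := by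
  induction cards with
  | nil => intro p; rfl
  | cons c r ih =>
    intro p
    simp only [parRec, stepsRec, List.zip_cons_cons, List.map_cons, ih]

theorem pv_seats_acc (steps : List Int) : ∀ (n t : Int) (acc : List Int),
    (steps.foldl (fun (st : Int × List Int) s => (st.1 + s, st.2 ++ [PySem.Int.mod st.1 n])) (t, acc)).2
      = acc ++ seatsRec steps n t := by
  induction steps with
  | nil => intro n t acc; simp [seatsRec]
  | cons s r ih => intro n t acc; simp [List.foldl, seatsRec, ih]

theorem pv_dist_acc (cards : List String) : ∀ (seats : List Int) (hands : List (List String)),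
    (cards.zip seats).foldl (fun hands ck => pvAppendAt hands ck.2 ck.1) hands
      = distRec cards seats hands := by
  induction cards with
  | nil => intro seats hands; simp [distRec]
  | cons c r ih =>
    intro seats hands
    cases seats with
    | nil => simp [distRec]
    | cons k kr => simp [List.foldl, distRec, ih]

-- both initial hands are num_players empty hands
theorem pv_init_eq (acc : List (List String)) (l : List Int) :
    l.foldl (fun h _ => h ++ [[]]) acc = acc ++ l.map (fun _ => ([] : List String)) := by
  induction l generalizing acc with
  | nil => simp
  | cons x xs ih => simp [List.foldl, ih]

-- the bridge: A's loop state (i, rev, nr) determines B's seat stream via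
-- total = i - rev and parity = (nr % 2 = 1)
theorem pv_main (cards : List String) : ∀ (i : Nat) (rev nr n : Int) (hands : List (List String)),
    unoA_loop cards i rev nr n hands
      = distRec cards (seatsRec (stepsRec cards (decide (nr % 2 = 1))) n ((i : Int) - rev)) hands := by
  induction cards with
  | nil => intro i rev nr n hands; rfl
  | cons c rest ih =>
    intro i rev nr n hands
    simp only [unoA_loop, stepsRec, seatsRec, distRec]
    by_cases hr : c == "reverse"
    · have hs : (c == "skip") = false := by cases hb : (c == "skip") <;> simp_all
      simp only [hr, hs, if_true, if_false, Bool.false_eq_true]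
      by_cases hp : nr % 2 = 1
      · have hp' : ¬ ((nr + 1) % 2 = 1) := by omega
        have hpx : Bool.xor (decide (nr % 2 = 1)) true = decide ((nr + 1) % 2 = 1) := by
          simp [hp, hp']
        simp only [if_pos hp, if_neg hp', ih, hpx]
        have h1 : ((i : Int) + 1) - rev = (i : Int) - rev + (if decide ((nr+1) % 2 = 1) then (-1:Int) else 1) * 1 := by
          simp [hp']; ring
        push_cast
        rw [h1]
      · have hp' : (nr + 1) % 2 = 1 := by omega
        have hpx : Bool.xor (decide (nr % 2 = 1)) true = decide ((nr + 1) % 2 = 1) := by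
          simp [hp, hp']
        simp only [if_neg hp, if_pos hp', ih, hpx]
        have h1 : ((i : Int) + 1) - (rev + 2) = (i : Int) - rev + (if decide ((nr+1) % 2 = 1) then (-1:Int) else 1) * 1 := by
          simp [hp']; ring
        push_cast
        rw [h1]
    · by_cases hs : c == "skip"
      · simp only [hr, hs, if_true, if_false, Bool.false_eq_true, Bool.xor_false]
        by_cases hp : nr % 2 = 1
        · simp only [if_pos hp, ih]
          have h1 : ((i : Int) + 1) - (rev + 1 + 2) = (i : Int) - rev + (if decide (nr % 2 = 1) then (-1:Int) else 1) * 2 := by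
            simp [hp]; ring
          push_cast
          rw [h1]
        · simp only [if_neg hp, ih]
          have h1 : ((i : Int) + 1) - (rev - 1) = (i : Int) - rev + (if decide (nr % 2 = 1) then (-1:Int) else 1) * 2 := by
            simp [hp]; ring
          push_cast
          rw [h1]
      · simp only [hr, hs, if_false, Bool.false_eq_true, Bool.xor_false]
        by_cases hp : nr % 2 = 1
        · simp only [if_pos hp, ih]
          have h1 : ((i : Int) + 1) - (rev + 2) = (i : Int) - rev + (if decide (nr % 2 = 1) then (-1:Int) else 1) * 1 := by
            simp [hp]; ring
          push_cast
          rw [h1]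
        · simp only [if_neg hp, ih]
          have h1 : ((i : Int) + 1) - rev = (i : Int) - rev + (if decide (nr % 2 = 1) then (-1:Int) else 1) * 1 := by
            simp [hp]; ring
          push_cast
          rw [h1]

-- ===== VERDICT (by name: the statement is the Claim_ definition above) =====
theorem uno_who_played_what_B5_spec : Claim_equal_uno_who_played_what_B5 := by
  intro cards n sp _ _
  unfold Spec_uno_who_played_what_B5 uno_who_played_what_B5 uno_who_played_what_B5_alt
  rw [pv_init_eq]
  simp only [List.nil_append]
  rw [pv_dist_acc]
  unfold pvSeats pvSteps pvParities
  rw [pv_par_acc]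
  simp only [List.nil_append]
  rw [pv_steps_eq, pv_seats_acc]
  simp only [List.nil_append]
  have h := pv_main cards 0 (1 - sp) 0 n ((PySem.List.pyRange 0 n 1).map (fun _ => []))
  norm_num at h ⊢
  exact h
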